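-- pv_equiv track=rewrite | github.com/nnwp-ross/bingo | bingo.py | numCards
-- ===== SOURCE A (Python) =====
-- def numCards(num):
--     cards = {}
--     index = 0
--     for i in range(num):
--         cards[i] = []
--         for j in range(5):
--             list = []
--             for k in range(5):
--                 list.append(index)
--                 index += 1
--             cards[i].append(list)
--     return cards
-- ===== SOURCE B (Python) =====
-- def numCards(num):
--     # staged pipeline: one flat sequence of all cell values, chunked
--     # by slicing into five-element rows, then the rows into five-row cards
--     flat = list(range(25 * num))
--     rows = [flat[t:t + 5] for t in range(0, len(flat), 5)]
--     return {i: rows[5 * i:5 * i + 5] for i in range(num)}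
-- ===== Notes on version B (the rewrite author's own statement) =====
-- stated objective: alternative
-- what changed: B replaces A's triply nested loops threading a mutable index counter with a staged slicing pipeline: materialise the flat sequence of all cell values once, slice it into five-element rows, then slice the row list into five-row cards.
import Mathlib
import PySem

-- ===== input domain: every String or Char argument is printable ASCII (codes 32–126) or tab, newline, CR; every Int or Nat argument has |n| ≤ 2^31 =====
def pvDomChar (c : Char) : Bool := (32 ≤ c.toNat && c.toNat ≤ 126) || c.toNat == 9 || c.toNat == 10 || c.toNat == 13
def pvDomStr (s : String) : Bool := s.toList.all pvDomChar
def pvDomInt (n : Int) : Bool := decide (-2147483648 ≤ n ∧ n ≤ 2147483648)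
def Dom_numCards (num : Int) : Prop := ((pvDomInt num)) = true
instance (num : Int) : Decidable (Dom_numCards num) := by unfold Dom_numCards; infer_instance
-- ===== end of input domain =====

-- B replaces A's nested loops with a threaded index counter by a staged slicing pipeline
-- (flat sequence, then rows of 5, then cards of 5); objective: alternative decomposition.

-- ===== PORT A =====
-- one iteration of A's outer loop: insert cards[i] = [], then five rows of five
-- appended cells, threading the running index in the second state component
def numCardsCard (st : PySem.Dict Int (List (List Int)) × Int) (i : Int) :
    PySem.Dict Int (List (List Int)) × Int :=
  (PySem.List.pyRange 0 5 1).foldl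
    (fun st2 _j =>
      let p := (PySem.List.pyRange 0 5 1).foldl
        (fun (st3 : List Int × Int) _k => (st3.1 ++ [st3.2], st3.2 + 1)) ([], st2.2)
      (st2.1.modify i [] (fun l => l ++ [p.1]), p.2))
    (st.1.insert i ([] : List (List Int)), st.2)

def numCards (num : Int) : List (Int × List (List Int)) :=
  ((PySem.List.pyRange 0 num 1).foldl numCardsCard (PySem.Dict.empty, 0)).1.items

-- ===== PORT B =====
def numCards_alt (num : Int) : List (Int × List (List Int)) :=
  let flat := PySem.List.pyRange 0 (25 * num) 1
  let rows := (PySem.List.pyRange 0 (PySem.List.len flat) 5).map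
    (fun t => PySem.List.slice flat (some t) (some (t + 5)))
  (PySem.List.pyRange 0 num 1).map
    (fun i => (i, PySem.List.slice rows (some (5 * i)) (some (5 * i + 5))))

-- ===== PRECONDITION & SPEC =====
def Spec_numCards (num : Int) (out : List (Int × List (List Int))) : Prop := out = numCards_alt num
instance (num : Int) (out : List (Int × List (List Int))) : Decidable (Spec_numCards num out) := by unfold Spec_numCards; infer_instance

-- ===== CLAIM (what is proved, stated in full; the proofs are below) =====
def Claim_equal_numCards : Prop := ∀ (num : Int), Dom_numCards num → Spec_numCards num (numCards num)

-- ===== LEMMAS AND PROOFS =====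
-- the five rows A builds for a card whose first cell is c
def rowsA (c : Int) : List (List Int) :=
  [[c, c+1, c+2, c+3, c+4], [c+5, c+6, c+7, c+8, c+9], [c+10, c+11, c+12, c+13, c+14],
   [c+15, c+16, c+17, c+18, c+19], [c+20, c+21, c+22, c+23, c+24]]

theorem insert_modify_self (d : PySem.Dict Int (List (List Int))) (i : Int)
    (v : List (List Int)) (f : List (List Int) → List (List Int)) :
    (d.insert i v).modify i [] f = d.insert i (f v) := by
  show (d.insert i v).insert i (f ((d.insert i v).getD i [])) = _
  rw [PySem.Dict.getD_insert_self, PySem.Dict.insert_insert_self]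

theorem cardStep (d : PySem.Dict Int (List (List Int))) (c i : Int) :
    numCardsCard (d, c) i = (d.insert i (rowsA c), c + 25) := by
  simp only [numCardsCard, show PySem.List.pyRange 0 5 1 = [0,1,2,3,4] from rfl,
    List.foldl, insert_modify_self, rowsA]
  norm_num
  refine ⟨congrArg (d.insert i) ?_, by ring⟩
  norm_num
  omega

theorem pyRange_zero_eq (num : Int) :
    PySem.List.pyRange 0 num 1 = (List.range num.toNat).map (fun k => ((k : Nat) : Int)) := by
  rw [PySem.List.pyRange_one]; simp

theorem loopA (n : Nat) :
    List.foldl numCardsCard (PySem.Dict.empty, (0 : Int))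
        ((List.range n).map (fun k => ((k : Nat) : Int)))
      = (List.foldl (fun d i => d.insert i (rowsA (25 * i))) PySem.Dict.empty
          ((List.range n).map (fun k => ((k : Nat) : Int))), 25 * (n : Int)) := by
  induction n with
  | zero => simp
  | succ m ih =>
    rw [List.range_succ, List.map_append, List.foldl_append, List.foldl_append, ih]
    simp only [List.map_cons, List.map_nil, List.foldl_cons, List.foldl_nil, cardStep]
    rw [Prod.ext_iff]
    exact ⟨rfl, by push_cast; ring⟩

theorem itemsA (n : Nat) :
    (List.foldl (fun d i => d.insert i (rowsA (25 * i))) PySem.Dict.empty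
        ((List.range n).map (fun k => ((k : Nat) : Int)))).items
      = ((List.range n).map (fun k => ((k : Nat) : Int))).map
          (fun i => (i, rowsA (25 * i))) := by
  have h := PySem.Dict.items_foldl_insert_fresh
    ((List.range n).map (fun k => ((k : Nat) : Int))) (fun i => i) (fun i => rowsA (25 * i))
    PySem.Dict.empty (by intro a _; exact PySem.Dict.contains_empty a)
    (by simp only [List.map_map]
        exact List.nodup_range.map (fun a b h => Nat.cast_injective h))
  simpa using h

-- chunk of 5 consecutive indices out of List.range
theorem take_drop_range (m k : Nat) (h : k + 5 ≤ m) :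
    ((List.range m).drop k).take 5 = [k, k+1, k+2, k+3, k+4] := by
  rw [List.range_eq_range', List.drop_range']
  have h2 : List.range' (0 + k * 1) (5 + (m - k - 5)) =
      List.range' k 5 ++ List.range' (k + 1 * 5) (m - k - 5) := by
    rw [List.range'_append]; norm_num
  rw [show m - k = 5 + (m - k - 5) by omega, h2]
  rw [List.take_append_of_le_length (by simp)]
  simp [List.range', List.take]

-- the r-th row of B's pipeline
def rowOf (r : Nat) : List Nat := [5*r, 5*r+1, 5*r+2, 5*r+3, 5*r+4]

theorem flat_eq (num : Int) :
    PySem.List.pyRange 0 (25 * num) 1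
      = (List.range (25 * num.toNat)).map (fun k => ((k : Nat) : Int)) := by
  rw [PySem.List.pyRange_one]
  have : (25 * num - 0).toNat = 25 * num.toNat := by omega
  rw [this]; simp

theorem slice_map_range (m j : Nat) (h : j + 5 ≤ m) :
    PySem.List.slice ((List.range m).map (fun k => ((k : Nat) : Int)))
        (some ((j : Nat) : Int)) (some (((j : Nat) : Int) + 5))
      = ([j, j+1, j+2, j+3, j+4] : List Nat).map (fun k => ((k : Nat) : Int)) := by
  rw [show ((5 : Int)) = ((5 : Nat) : Int) from rfl, PySem.List.slice_natCast_add]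
  rw [← List.map_drop, ← List.map_take, take_drop_range m j h]

theorem rows_eq (num : Int) :
    (PySem.List.pyRange 0 (PySem.List.len (PySem.List.pyRange 0 (25 * num) 1)) 5).map
        (fun t => PySem.List.slice (PySem.List.pyRange 0 (25 * num) 1) (some t) (some (t + 5)))
      = (List.range (5 * num.toNat)).map (fun r => (rowOf r).map (fun k => ((k : Nat) : Int))) := by
  have hlen : PySem.List.len (PySem.List.pyRange 0 (25 * num) 1) = ((25 * num.toNat : Nat) : Int) := by
    rw [flat_eq]; simp [PySem.List.len]
  rw [hlen, PySem.List.pyRange_of_pos _ _ (by norm_num : (0:Int) < 5)]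
  have hcount : (if (0:Int) < ((25 * num.toNat : Nat) : Int)
      then ((((25 * num.toNat : Nat) : Int) - 0 + 5 - 1) / 5).toNat else 0) = 5 * num.toNat := by
    split_ifs with h
    · omega
    · omega
  rw [hcount, List.map_map]
  refine List.map_congr_left (fun r hr => ?_)
  have hr' : r < 5 * num.toNat := List.mem_range.mp hr
  have h5 : 5 * r + 5 ≤ 25 * num.toNat := by omega
  have : ((0 : Int) + 5 * (r : Int)) = (((5 * r : Nat) : Int)) := by push_cast; ring
  rw [Function.comp_apply, this, flat_eq, slice_map_range _ _ h5]
  simp only [rowOf]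

theorem card_slice (n k : Nat) (hk : k < n) :
    PySem.List.slice
        ((List.range (5 * n)).map (fun r => (rowOf r).map (fun j => ((j : Nat) : Int))))
        (some (5 * ((k : Nat) : Int))) (some (5 * ((k : Nat) : Int) + 5))
      = rowsA (25 * ((k : Nat) : Int)) := by
  have h1 : (5 * ((k : Nat) : Int)) = (((5 * k : Nat) : Int)) := by push_cast; ring
  rw [h1, show ((5 : Int)) = ((5 : Nat) : Int) from rfl, PySem.List.slice_natCast_add]
  rw [← List.map_drop, ← List.map_take, take_drop_range (5 * n) (5 * k) (by omega)]
  simp only [rowOf, rowsA, List.map_cons, List.map_nil, List.cons.injEq, and_true]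
  push_cast
  omega

-- ===== VERDICT (by name: the statement is the Claim_ definition above) =====
theorem numCards_spec : Claim_equal_numCards := by
  intro num _
  unfold Spec_numCards numCards numCards_alt
  rw [pyRange_zero_eq, loopA, itemsA]
  simp only [rows_eq]
  rw [List.map_map, List.map_map]
  refine List.map_congr_left (fun k hk => ?_)
  have hk' : k < num.toNat := List.mem_range.mp hk
  simp only [Function.comp_apply]
  rw [card_slice num.toNat k hk']
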